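-- pv_equiv track=rewrite | github.com/mkdir-not-war/mapgen | worldgen/worldgen.py | getcurrenttemp
-- ===== SOURCE A (Python) =====
-- COASTAL_DIST = 2
--
-- def getcurrenttemp(degrees, coastinfo):
-- 	result = None # None if inland, not coastal
-- 	for direction, dist in coastinfo:
-- 		if dist <= COASTAL_DIST:
-- 			if degrees < 10:
-- 				# north polar gyre
-- 				if direction[0] > 0:
-- 					result = 'cold'
-- 				elif direction[0] < 0:
-- 					result = 'warm'
-- 			elif degrees < 20:
-- 				# north ferrel gyre
-- 				if direction[0] > 0:
-- 					result = 'warm'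
-- 				elif direction[0] < 0:
-- 					result = 'cold'
-- 			elif degrees < 50:
-- 				# north midlat gyre
-- 				if direction[0] > 0:
-- 					result = 'cold'
-- 				elif direction[0] < 0:
-- 					result = 'warm'
-- 			elif degrees < 90:
-- 				# north hadley gyre
-- 				if direction[0] > 0:
-- 					result = 'warm'
-- 				elif direction[0] < 0:
-- 					result = 'cold'
-- 			elif degrees < 130:
-- 				# south hadley gyre
-- 				if direction[0] > 0:
-- 					result = 'warm'
-- 				elif direction[0] < 0:
-- 					result = 'cold'
-- 			elif degrees < 160:
-- 				# south midlat gyre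
-- 				if direction[0] > 0:
-- 					result = 'cold'
-- 				elif direction[0] < 0:
-- 					result = 'warm'
-- 			elif degrees < 170:
-- 				# south ferrel gyre
-- 				if direction[0] > 0:
-- 					result = 'warm'
-- 				elif direction[0] < 0:
-- 					result = 'cold'
-- 			else:
-- 				# south polar gyre
-- 				if direction[0] > 0:
-- 					result = 'cold'
-- 				elif direction[0] < 0:
-- 					result = 'warm'
-- 			return result
-- ===== SOURCE B (Python) =====
-- COASTAL_DIST = 2
--
-- _BOUNDS = (10, 20, 50, 90, 130, 160, 170)
-- # temperature for an eastward (direction[0] > 0) current, per latitude band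
-- _EAST = ('cold', 'warm', 'cold', 'warm', 'warm', 'cold', 'warm', 'cold')
--
-- def getcurrenttemp(degrees, coastinfo):
--     for direction, dist in coastinfo:
--         if dist <= COASTAL_DIST:
--             if direction[0] == 0:
--                 return None
--             band = sum(1 for b in _BOUNDS if degrees >= b)
--             t = _EAST[band]
--             if direction[0] > 0:
--                 return t
--             return 'cold' if t == 'warm' else 'warm'
--     return None
-- ===== Notes on version B (the rewrite author's own statement) =====
-- stated objective: simpler
-- what changed: Replaced the eight-way branch chain repeating the east/west if-else with a band lookup: count bounds passed to index a temperature table for eastward currents, and flip the entry for westward ones.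
import Mathlib
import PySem

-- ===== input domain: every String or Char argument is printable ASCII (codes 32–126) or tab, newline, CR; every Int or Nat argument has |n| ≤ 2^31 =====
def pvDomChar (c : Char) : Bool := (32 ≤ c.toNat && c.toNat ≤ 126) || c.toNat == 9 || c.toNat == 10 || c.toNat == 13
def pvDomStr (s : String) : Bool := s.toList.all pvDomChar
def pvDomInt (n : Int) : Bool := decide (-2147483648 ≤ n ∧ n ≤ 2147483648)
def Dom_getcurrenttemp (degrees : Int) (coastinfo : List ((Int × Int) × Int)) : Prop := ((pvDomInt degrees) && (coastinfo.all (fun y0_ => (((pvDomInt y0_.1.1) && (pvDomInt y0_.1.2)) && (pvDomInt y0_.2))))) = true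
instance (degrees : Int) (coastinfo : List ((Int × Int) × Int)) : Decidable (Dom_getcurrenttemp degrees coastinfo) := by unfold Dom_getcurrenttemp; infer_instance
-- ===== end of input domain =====

-- B replaces the eight-way latitude branch chain with a band count into a lookup table (objective: simpler).


-- ===== PORT A =====
def getcurrenttemp (degrees : Int) (coastinfo : List ((Int × Int) × Int)) : Option String :=
  match coastinfo with
  | [] => none
  | (direction, dist) :: rest =>
    if dist ≤ 2 then
      (if degrees < 10 then
        (if direction.1 > 0 then some "cold" else if direction.1 < 0 then some "warm" else none)
      else if degrees < 20 then
        (if direction.1 > 0 then some "warm" else if direction.1 < 0 then some "cold" else none)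
      else if degrees < 50 then
        (if direction.1 > 0 then some "cold" else if direction.1 < 0 then some "warm" else none)
      else if degrees < 90 then
        (if direction.1 > 0 then some "warm" else if direction.1 < 0 then some "cold" else none)
      else if degrees < 130 then
        (if direction.1 > 0 then some "warm" else if direction.1 < 0 then some "cold" else none)
      else if degrees < 160 then
        (if direction.1 > 0 then some "cold" else if direction.1 < 0 then some "warm" else none)
      else if degrees < 170 then
        (if direction.1 > 0 then some "warm" else if direction.1 < 0 then some "cold" else none)
      else
        (if direction.1 > 0 then some "cold" else if direction.1 < 0 then some "warm" else none))
    else getcurrenttemp degrees rest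

-- ===== PORT B =====
def pvBounds : List Int := [10, 20, 50, 90, 130, 160, 170]

def pvEast : List String := ["cold", "warm", "cold", "warm", "warm", "cold", "warm", "cold"]

def getcurrenttemp_alt (degrees : Int) (coastinfo : List ((Int × Int) × Int)) : Option String :=
  match coastinfo with
  | [] => none
  | (direction, dist) :: rest =>
    if dist ≤ 2 then
      if direction.1 = 0 then none
      else
        let band := (pvBounds.filter (fun b => degrees ≥ b)).length
        let t := pvEast.getD band ""
        if direction.1 > 0 then some t
        else some (if t = "warm" then "cold" else "warm")
    else getcurrenttemp_alt degrees rest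

-- ===== PRECONDITION & SPEC =====
def Spec_getcurrenttemp (degrees : Int) (coastinfo : List ((Int × Int) × Int)) (out : Option String) : Prop := out = getcurrenttemp_alt degrees coastinfo
instance (degrees : Int) (coastinfo : List ((Int × Int) × Int)) (out : Option String) : Decidable (Spec_getcurrenttemp degrees coastinfo out) := by unfold Spec_getcurrenttemp; infer_instance

-- ===== CLAIM (what is proved, stated in full; the proofs are below) =====
def Claim_equal_getcurrenttemp : Prop := ∀ (degrees : Int) (coastinfo : List ((Int × Int) × Int)), Dom_getcurrenttemp degrees coastinfo → Spec_getcurrenttemp degrees coastinfo (getcurrenttemp degrees coastinfo)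

-- ===== LEMMAS AND PROOFS =====

-- the band index B computes is exactly A's latitude case split
lemma band_eq (degrees : Int) :
    (pvBounds.filter (fun b => degrees ≥ b)).length =
    if degrees < 10 then 0 else if degrees < 20 then 1 else if degrees < 50 then 2
    else if degrees < 90 then 3 else if degrees < 130 then 4 else if degrees < 160 then 5
    else if degrees < 170 then 6 else 7 := by
  by_cases h0 : degrees < 10
  · simp [pvBounds, List.filter, show ¬ degrees ≥ 10 by omega, show ¬ degrees ≥ 20 by omega, show ¬ degrees ≥ 50 by omega, show ¬ degrees ≥ 90 by omega, show ¬ degrees ≥ 130 by omega, show ¬ degrees ≥ 160 by omega, show ¬ degrees ≥ 170 by omega, *]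
  by_cases h1 : degrees < 20
  · simp [pvBounds, List.filter, show degrees ≥ 10 by omega, show ¬ degrees ≥ 20 by omega, show ¬ degrees ≥ 50 by omega, show ¬ degrees ≥ 90 by omega, show ¬ degrees ≥ 130 by omega, show ¬ degrees ≥ 160 by omega, show ¬ degrees ≥ 170 by omega, *]
  by_cases h2 : degrees < 50
  · simp [pvBounds, List.filter, show degrees ≥ 10 by omega, show degrees ≥ 20 by omega, show ¬ degrees ≥ 50 by omega, show ¬ degrees ≥ 90 by omega, show ¬ degrees ≥ 130 by omega, show ¬ degrees ≥ 160 by omega, show ¬ degrees ≥ 170 by omega, *]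
  by_cases h3 : degrees < 90
  · simp [pvBounds, List.filter, show degrees ≥ 10 by omega, show degrees ≥ 20 by omega, show degrees ≥ 50 by omega, show ¬ degrees ≥ 90 by omega, show ¬ degrees ≥ 130 by omega, show ¬ degrees ≥ 160 by omega, show ¬ degrees ≥ 170 by omega, *]
  by_cases h4 : degrees < 130
  · simp [pvBounds, List.filter, show degrees ≥ 10 by omega, show degrees ≥ 20 by omega, show degrees ≥ 50 by omega, show degrees ≥ 90 by omega, show ¬ degrees ≥ 130 by omega, show ¬ degrees ≥ 160 by omega, show ¬ degrees ≥ 170 by omega, *]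
  by_cases h5 : degrees < 160
  · simp [pvBounds, List.filter, show degrees ≥ 10 by omega, show degrees ≥ 20 by omega, show degrees ≥ 50 by omega, show degrees ≥ 90 by omega, show degrees ≥ 130 by omega, show ¬ degrees ≥ 160 by omega, show ¬ degrees ≥ 170 by omega, *]
  by_cases h6 : degrees < 170
  · simp [pvBounds, List.filter, show degrees ≥ 10 by omega, show degrees ≥ 20 by omega, show degrees ≥ 50 by omega, show degrees ≥ 90 by omega, show degrees ≥ 130 by omega, show degrees ≥ 160 by omega, show ¬ degrees ≥ 170 by omega, *]
  simp [pvBounds, List.filter, show degrees ≥ 10 by omega, show degrees ≥ 20 by omega, show degrees ≥ 50 by omega, show degrees ≥ 90 by omega, show degrees ≥ 130 by omega, show degrees ≥ 160 by omega, show degrees ≥ 170 by omega, *]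

-- the first coastal entry produces the same answer in both programs
lemma body_eq (degrees : Int) (direction : Int × Int) :
    (if degrees < 10 then
        (if direction.1 > 0 then some "cold" else if direction.1 < 0 then some "warm" else none)
      else if degrees < 20 then
        (if direction.1 > 0 then some "warm" else if direction.1 < 0 then some "cold" else none)
      else if degrees < 50 then
        (if direction.1 > 0 then some "cold" else if direction.1 < 0 then some "warm" else none)
      else if degrees < 90 then
        (if direction.1 > 0 then some "warm" else if direction.1 < 0 then some "cold" else none)
      else if degrees < 130 then
        (if direction.1 > 0 then some "warm" else if direction.1 < 0 then some "cold" else none)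
      else if degrees < 160 then
        (if direction.1 > 0 then some "cold" else if direction.1 < 0 then some "warm" else none)
      else if degrees < 170 then
        (if direction.1 > 0 then some "warm" else if direction.1 < 0 then some "cold" else none)
      else
        (if direction.1 > 0 then some "cold" else if direction.1 < 0 then some "warm" else none) : Option String) =
    (if direction.1 = 0 then none
      else
        let band := (pvBounds.filter (fun b => degrees ≥ b)).length
        let t := pvEast.getD band ""
        if direction.1 > 0 then some t
        else some (if t = "warm" then "cold" else "warm")) := by
  rcases lt_trichotomy direction.1 0 with hd | hd | hd
  · rw [if_neg (by omega : ¬ direction.1 = 0)]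
    simp only [band_eq, if_neg (by omega : ¬ direction.1 > 0), if_pos hd]
    split_ifs <;> simp_all [pvEast]
  · rw [hd, if_pos rfl]
    simp only [show ¬ (0:Int) > 0 by omega, if_false]
    split_ifs <;> rfl
  · rw [if_neg (by omega : ¬ direction.1 = 0)]
    simp only [band_eq, if_pos hd]
    split_ifs <;> simp_all [pvEast]

-- ===== VERDICT (by name: the statement is the Claim_ definition above) =====
theorem getcurrenttemp_spec : Claim_equal_getcurrenttemp := by
  intro degrees coastinfo hdom
  clear hdom
  unfold Spec_getcurrenttemp
  induction coastinfo with
  | nil => rfl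
  | cons hd rest ih =>
    obtain ⟨direction, dist⟩ := hd
    simp only [getcurrenttemp, getcurrenttemp_alt]
    by_cases hdist : dist ≤ 2
    · simp only [if_pos hdist]
      exact body_eq degrees direction
    · simp only [if_neg hdist]; exact ih
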